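-- pv_equiv track=rewrite | github.com/TobiasWooldridge/WaveCap | backend/src/wavecap_backend/stream_worker.py | _normalize_hallucination_phrase
-- ===== SOURCE A (Python) =====
-- from typing import (
--     AsyncIterator,
--     Awaitable,
--     Callable,
--     Deque,
--     Iterable,
--     List,
--     Pattern,
--     Optional,
--     Set,
--     Tuple,
-- )
--
-- def _normalize_hallucination_phrase(text: str) -> str:
--     lowered = text.strip().lower()
--     if not lowered:
--         return ""
--     normalized_chars: List[str] = []
--     for char in lowered:
--         if char.isalnum():
--             normalized_chars.append(char)
--         elif char.isspace():
--             normalized_chars.append(" ")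
--     if not normalized_chars:
--         return ""
--     normalized = "".join(normalized_chars)
--     return " ".join(normalized.split())
-- ===== SOURCE B (Python) =====
-- def _normalize_hallucination_phrase(text: str) -> str:
--     words = []
--     buf = []
--     for char in text.lower():
--         if char.isalnum():
--             buf.append(char)
--         elif char.isspace():
--             if buf:
--                 words.append("".join(buf))
--                 buf = []
--     if buf:
--         words.append("".join(buf))
--     return " ".join(words)
-- ===== Notes on version B (the rewrite author's own statement) =====
-- stated objective: alternative
-- what changed: B builds the normalized words in one pass with a current-word buffer (flush on whitespace, skip other chars, no strip), instead of A's filter-into-a-string followed by a split/join whitespace collapse.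
import Mathlib
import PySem

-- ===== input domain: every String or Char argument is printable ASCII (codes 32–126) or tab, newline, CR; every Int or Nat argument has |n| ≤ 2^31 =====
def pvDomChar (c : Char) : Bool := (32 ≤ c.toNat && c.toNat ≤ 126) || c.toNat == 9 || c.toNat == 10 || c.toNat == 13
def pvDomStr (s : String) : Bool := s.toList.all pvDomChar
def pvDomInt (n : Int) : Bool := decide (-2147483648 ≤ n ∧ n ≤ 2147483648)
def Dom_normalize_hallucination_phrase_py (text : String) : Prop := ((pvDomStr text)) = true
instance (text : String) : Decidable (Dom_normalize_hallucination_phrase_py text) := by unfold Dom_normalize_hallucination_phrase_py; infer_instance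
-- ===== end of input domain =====

-- B replaces A's filter-then-split/join with a single pass that flushes a word buffer on whitespace (no strip needed); same output, same O(n) cost.

-- ===== PORT A =====
-- loop body of A's 'for char in lowered' accumulation (append kept char / a space / nothing)
def pvStepA (acc : List Char) (c : Char) : List Char :=
  if PySem.Chars.isalnum c then acc ++ [c]
  else if PySem.Chars.isspace c then acc ++ [' ']
  else acc

-- port of A on the char-list side (PySem.Chars.* are the exact List Char forms of str.strip/lower/split()/join);
-- "".join of single-char strings is String.mk of the char list.
def normalize_hallucination_phrase_py (text : String) : String :=
  let lowered : List Char := PySem.Chars.lower (PySem.Chars.strip text.toList)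
  if lowered = [] then ""
  else
    let normalized_chars := lowered.foldl pvStepA []
    if normalized_chars = [] then ""
    else String.mk (PySem.Chars.join [' '] (PySem.Chars.split₀ normalized_chars))

-- ===== PORT B =====
-- loop body of B: state = (words so far, current-word buffer)
def pvStepB (st : List (List Char) × List Char) (c : Char) : List (List Char) × List Char :=
  if PySem.Chars.isalnum c then (st.1, st.2 ++ [c])
  else if PySem.Chars.isspace c then (if st.2 = [] then st else (st.1 ++ [st.2], []))
  else st

def normalize_hallucination_phrase_py_alt (text : String) : String :=
  let st := (PySem.Chars.lower text.toList).foldl pvStepB ([], [])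
  let words := if st.2 = [] then st.1 else st.1 ++ [st.2]
  String.mk (PySem.Chars.join [' '] words)

-- ===== PRECONDITION & SPEC =====
def Spec_normalize_hallucination_phrase_py (text : String) (out : String) : Prop := out = normalize_hallucination_phrase_py_alt text
instance (text : String) (out : String) : Decidable (Spec_normalize_hallucination_phrase_py text out) := by unfold Spec_normalize_hallucination_phrase_py; infer_instance

-- ===== CLAIM (what is proved, stated in full; the proofs are below) =====
def Claim_equal_normalize_hallucination_phrase_py : Prop := ∀ (text : String), Dom_normalize_hallucination_phrase_py text → Spec_normalize_hallucination_phrase_py text (normalize_hallucination_phrase_py text)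

-- ===== LEMMAS AND PROOFS =====

-- reference word builder: collect alnum runs, break on whitespace, skip everything else
def pvWords : List Char → List Char → List (List Char)
  | [], buf => if buf = [] then [] else [buf]
  | c :: cs, buf =>
    if PySem.Chars.isalnum c then pvWords cs (buf ++ [c])
    else if PySem.Chars.isspace c then (if buf = [] then pvWords cs [] else buf :: pvWords cs [])
    else pvWords cs buf

def pvF (c : Char) : Option Char :=
  if PySem.Chars.isalnum c then some c
  else if PySem.Chars.isspace c then some ' '
  else none

theorem pv_alnum_not_space (c : Char) (h : PySem.Chars.isalnum c = true) :
    PySem.Chars.isspace c = false := by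
  have h' : (65 ≤ c.toNat ∧ c.toNat ≤ 90) ∨ (97 ≤ c.toNat ∧ c.toNat ≤ 122) ∨
      (48 ≤ c.toNat ∧ c.toNat ≤ 57) := by
    simp only [PySem.Chars.isalnum, PySem.Chars.isalpha, PySem.Chars.isupper, PySem.Chars.islower,
      PySem.Chars.isdigit, Bool.or_eq_true, Bool.and_eq_true, decide_eq_true_eq] at h
    rcases h with (⟨h1, h2⟩ | ⟨h1, h2⟩) | ⟨h1, h2⟩
    · exact Or.inl ⟨h1, h2⟩
    · exact Or.inr (Or.inl ⟨h1, h2⟩)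
    · exact Or.inr (Or.inr ⟨h1, h2⟩)
  simp only [PySem.Chars.isspace, Bool.or_eq_false_iff, Bool.and_eq_false_iff,
    decide_eq_false_iff_not]
  omega

theorem pv_space_not_alnum (c : Char) (h : PySem.Chars.isspace c = true) :
    PySem.Chars.isalnum c = false := by
  cases ha : PySem.Chars.isalnum c with
  | false => rfl
  | true => rw [pv_alnum_not_space c ha] at h; exact absurd h (by simp)

theorem pv_lowerChar_of_space (c : Char) (h : PySem.Chars.isspace c = true) :
    PySem.Chars.lowerChar c = c := by
  have hu : PySem.Chars.isupper c = false := by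
    simp only [PySem.Chars.isspace, Bool.or_eq_true, Bool.and_eq_true, decide_eq_true_eq] at h
    simp only [PySem.Chars.isupper, Bool.and_eq_false_iff, decide_eq_false_iff_not]
    by_contra hcon
    rw [not_or, not_not, not_not] at hcon
    have h1 : 65 ≤ c.toNat := hcon.1
    have h2 : c.toNat ≤ 90 := hcon.2
    omega
  simp [PySem.Chars.lowerChar, hu]

-- A's loop accumulates exactly the filterMap of pvF
theorem pv_foldA_eq (cs : List Char) : ∀ acc, cs.foldl pvStepA acc = acc ++ cs.filterMap pvF := by
  induction cs with
  | nil => intro acc; simp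
  | cons c cs ih =>
    intro acc
    rw [List.foldl_cons, List.filterMap_cons]
    by_cases h1 : PySem.Chars.isalnum c
    · rw [show pvF c = some c by simp [pvF, h1],
        show pvStepA acc c = acc ++ [c] by simp [pvStepA, h1]]
      simp [ih]
    · by_cases h2 : PySem.Chars.isspace c
      · rw [show pvF c = some ' ' by simp [pvF, h1, h2],
          show pvStepA acc c = acc ++ [' '] by simp [pvStepA, h1, h2]]
        simp [ih]
      · rw [show pvF c = none by simp [pvF, h1, h2],
          show pvStepA acc c = acc by simp [pvStepA, h1, h2]]
        exact ih acc

-- split₀ of the filtered char stream = the reference word builder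
theorem pv_split_go_filterMap (cs : List Char) : ∀ cur acc,
    PySem.Chars.split₀.go (cs.filterMap pvF) cur acc = acc.reverse ++ pvWords cs cur.reverse := by
  induction cs with
  | nil =>
    intro cur acc
    simp only [List.filterMap_nil, PySem.Chars.split₀.go, pvWords]
    by_cases hc : cur = []
    · simp [hc]
    · simp [hc, List.isEmpty_iff, List.reverse_eq_nil_iff]
  | cons c cs ih =>
    intro cur acc
    rw [List.filterMap_cons]
    by_cases h1 : PySem.Chars.isalnum c
    · -- alnum: kept as c, not a space for split₀.go
      rw [show pvF c = some c by simp [pvF, h1]]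
      simp only []
      rw [show (PySem.Chars.split₀.go (c :: cs.filterMap pvF) cur acc) =
            PySem.Chars.split₀.go (cs.filterMap pvF) (c :: cur) acc by
          simp [PySem.Chars.split₀.go, pv_alnum_not_space c h1]]
      rw [ih (c :: cur) acc]
      simp [pvWords, h1]
    · by_cases h2 : PySem.Chars.isspace c
      · -- whitespace: emitted as ' ', which split₀.go treats as a separator
        rw [show pvF c = some ' ' by simp [pvF, h1, h2]]
        simp only []
        rw [show (PySem.Chars.split₀.go (' ' :: cs.filterMap pvF) cur acc) =
              (if cur.isEmpty then PySem.Chars.split₀.go (cs.filterMap pvF) [] acc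
               else PySem.Chars.split₀.go (cs.filterMap pvF) [] (cur.reverse :: acc)) by
            simp [PySem.Chars.split₀.go, show PySem.Chars.isspace ' ' = true by decide]]
        by_cases hc : cur = []
        · simp [hc, ih [] acc, pvWords, h1, h2]
        · simp only [List.isEmpty_iff, hc, if_false, ih [] (cur.reverse :: acc), List.reverse_cons]
          simp [pvWords, h1, h2, hc, List.reverse_eq_nil_iff]
      · -- other: dropped by pvF, transparent to pvWords
        rw [show pvF c = none by simp [pvF, h1, h2]]
        simp only []
        rw [ih cur acc]
        simp [pvWords, h1, h2]

theorem pv_split₀_filterMap (cs : List Char) :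
    PySem.Chars.split₀ (cs.filterMap pvF) = pvWords cs [] := by
  have := pv_split_go_filterMap cs [] []
  simpa [PySem.Chars.split₀] using this

-- B's loop + final flush = the reference word builder
theorem pv_foldB_eq (cs : List Char) : ∀ (ws : List (List Char)) (buf : List Char),
    (if (List.foldl pvStepB (ws, buf) cs).2 = [] then (List.foldl pvStepB (ws, buf) cs).1
     else (List.foldl pvStepB (ws, buf) cs).1 ++ [(List.foldl pvStepB (ws, buf) cs).2]) =
    ws ++ pvWords cs buf := by
  induction cs with
  | nil =>
    intro ws buf
    by_cases hb : buf = [] <;> simp [pvWords, hb]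
  | cons c cs ih =>
    intro ws buf
    rw [List.foldl_cons]
    by_cases h1 : PySem.Chars.isalnum c
    · rw [show pvStepB (ws, buf) c = (ws, buf ++ [c]) by simp [pvStepB, h1]]
      rw [ih ws (buf ++ [c])]
      simp [pvWords, h1]
    · by_cases h2 : PySem.Chars.isspace c
      · by_cases hb : buf = []
        · rw [show pvStepB (ws, buf) c = (ws, buf) by simp [pvStepB, h1, h2, hb]]
          rw [ih ws buf, hb]
          simp [pvWords, h1, h2]
        · rw [show pvStepB (ws, buf) c = (ws ++ [buf], []) by simp [pvStepB, h1, h2, hb]]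
          rw [ih (ws ++ [buf]) []]
          simp [pvWords, h1, h2, hb]
      · rw [show pvStepB (ws, buf) c = (ws, buf) by simp [pvStepB, h1, h2]]
        rw [ih ws buf]
        simp [pvWords, h1, h2]

-- whitespace at either end is invisible to pvWords
theorem pv_words_all_space (ws : List Char) (h : ∀ c ∈ ws, PySem.Chars.isspace c = true) :
    ∀ buf, pvWords ws buf = if buf = [] then [] else [buf] := by
  induction ws with
  | nil => intro buf; simp [pvWords]
  | cons w ws ih =>
    intro buf
    have hw : PySem.Chars.isspace w = true := h w (by simp)
    have hna : PySem.Chars.isalnum w = false := pv_space_not_alnum w hw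
    have ih' := ih (fun c hc => h c (by simp [hc]))
    by_cases hb : buf = [] <;> simp [pvWords, hna, hw, hb, ih' []]

theorem pv_words_space_suffix (ws : List Char) (h : ∀ c ∈ ws, PySem.Chars.isspace c = true)
    (cs : List Char) : ∀ buf, pvWords (cs ++ ws) buf = pvWords cs buf := by
  induction cs with
  | nil =>
    intro buf
    simpa [pvWords] using pv_words_all_space ws h buf
  | cons c cs ih =>
    intro buf
    simp only [List.cons_append, pvWords]
    split_ifs <;> simp [ih]

theorem pv_words_space_prefix (ws : List Char) (h : ∀ c ∈ ws, PySem.Chars.isspace c = true)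
    (cs : List Char) : pvWords (ws ++ cs) [] = pvWords cs [] := by
  induction ws with
  | nil => simp
  | cons w ws ih =>
    have hw : PySem.Chars.isspace w = true := h w (by simp)
    have hna : PySem.Chars.isalnum w = false := pv_space_not_alnum w hw
    simp only [List.cons_append, pvWords, hna, hw]
    simpa using ih (fun c hc => h c (by simp [hc]))

-- lower fixes whitespace characters
theorem pv_lower_all_space (ws : List Char) (h : ∀ c ∈ ws, PySem.Chars.isspace c = true) :
    ∀ c ∈ PySem.Chars.lower ws, PySem.Chars.isspace c = true := by
  intro c hc
  simp only [PySem.Chars.lower, List.mem_map] at hc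
  obtain ⟨d, hd, rfl⟩ := hc
  rw [pv_lowerChar_of_space d (h d hd)]
  exact h d hd

-- stripping before the pass does not change the word list
theorem pv_words_lower_strip (t : List Char) :
    pvWords (PySem.Chars.lower (PySem.Chars.strip t)) [] = pvWords (PySem.Chars.lower t) [] := by
  have hmid : PySem.Chars.lstrip t = PySem.Chars.strip t ++
      (List.takeWhile PySem.Chars.isspace (PySem.Chars.lstrip t).reverse).reverse := by
    calc PySem.Chars.lstrip t = ((PySem.Chars.lstrip t).reverse).reverse := by simp
    _ = (List.takeWhile PySem.Chars.isspace (PySem.Chars.lstrip t).reverse ++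
          List.dropWhile PySem.Chars.isspace (PySem.Chars.lstrip t).reverse).reverse := by
        rw [List.takeWhile_append_dropWhile]
    _ = (List.dropWhile PySem.Chars.isspace (PySem.Chars.lstrip t).reverse).reverse ++
          (List.takeWhile PySem.Chars.isspace (PySem.Chars.lstrip t).reverse).reverse := by
        rw [List.reverse_append]
    _ = PySem.Chars.strip t ++
          (List.takeWhile PySem.Chars.isspace (PySem.Chars.lstrip t).reverse).reverse := rfl
  have ht : t = List.takeWhile PySem.Chars.isspace t ++ (PySem.Chars.strip t ++
      (List.takeWhile PySem.Chars.isspace (PySem.Chars.lstrip t).reverse).reverse) := by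
    rw [← hmid]
    rw [show PySem.Chars.lstrip t = List.dropWhile PySem.Chars.isspace t from rfl,
      List.takeWhile_append_dropWhile]
  have hpre : ∀ c ∈ List.takeWhile PySem.Chars.isspace t, PySem.Chars.isspace c = true :=
    fun c hc => List.mem_takeWhile_imp hc
  have hsuf : ∀ c ∈ (List.takeWhile PySem.Chars.isspace (PySem.Chars.lstrip t).reverse).reverse,
      PySem.Chars.isspace c = true := by
    intro c hc
    rw [List.mem_reverse] at hc
    exact List.mem_takeWhile_imp hc
  conv_rhs => rw [ht]
  simp only [PySem.Chars.lower, List.map_append]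
  rw [pv_words_space_prefix (List.map PySem.Chars.lowerChar (List.takeWhile PySem.Chars.isspace t))
        (by simpa [PySem.Chars.lower] using pv_lower_all_space _ hpre) _,
      pv_words_space_suffix (List.map PySem.Chars.lowerChar
          ((List.takeWhile PySem.Chars.isspace (PySem.Chars.lstrip t).reverse).reverse))
        (by simpa [PySem.Chars.lower] using pv_lower_all_space _ hsuf) _]

theorem pv_A_eq (text : String) :
    normalize_hallucination_phrase_py text =
      String.mk (PySem.Chars.join [' ']
        (pvWords (PySem.Chars.lower (PySem.Chars.strip text.toList)) [])) := by
  simp only [normalize_hallucination_phrase_py]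
  by_cases h0 : PySem.Chars.lower (PySem.Chars.strip text.toList) = []
  · simp only [h0, if_true]
    show "" = String.mk (PySem.Chars.join [' '] (pvWords [] []))
    rfl
  · simp only [h0, if_false]
    rw [pv_foldA_eq (PySem.Chars.lower (PySem.Chars.strip text.toList)) []]
    simp only [List.nil_append]
    by_cases h1 : (PySem.Chars.lower (PySem.Chars.strip text.toList)).filterMap pvF = []
    · have h2 : pvWords (PySem.Chars.lower (PySem.Chars.strip text.toList)) [] = [] := by
        rw [← pv_split₀_filterMap, h1]
        rfl
      rw [h2]
      simp [h1]
      rfl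
    · rw [if_neg h1, pv_split₀_filterMap]

theorem pv_B_eq (text : String) :
    normalize_hallucination_phrase_py_alt text =
      String.mk (PySem.Chars.join [' '] (pvWords (PySem.Chars.lower text.toList) [])) := by
  simp only [normalize_hallucination_phrase_py_alt]
  rw [pv_foldB_eq (PySem.Chars.lower text.toList) [] []]
  rfl

-- ===== VERDICT (by name: the statement is the Claim_ definition above) =====
theorem normalize_hallucination_phrase_py_spec : Claim_equal_normalize_hallucination_phrase_py := by
  intro text _
  unfold Spec_normalize_hallucination_phrase_py
  rw [pv_A_eq text, pv_B_eq text, pv_words_lower_strip text.toList]
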